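-- pv_equiv track=rewrite | github.com/peageon/Coding-Interview-Prep | 백준/Gold/17140. 이차원 배열과 연산/이차원 배열과 연산.py | applyC
-- ===== SOURCE A (Python) =====
-- from collections import Counter, defaultdict
-- from itertools import chain
--
-- def applyC(board):
--   #transform?
--   t_board = []
--   for i in range(len(board[0])):
--     column = []
--     for j in range(len(board)):
--       column.append(board[j][i])
--     t_board.append(column)
--   t_board = applyR(t_board)
--   #transform back
--   applied_board = [[] for _ in range(len(t_board[0]))]
--   for j in range(len(t_board)):
--     for i in range (len(t_board[0])):
--       applied_board[i].append(t_board[j][i])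
--   return applied_board
--
-- def applyR(board):
--   largest = 0
--   for i in range(len(board)):
--     board[i] = sort_this(board[i])
--     if largest < len(board[i]):
--       largest = len(board[i])
--   #sorted
--   for i in range(len(board)):
--     board[i] = board[i] + ([0] * (largest-len(board[i])))
--   #added 0s
--   return board
--
-- def sort_this(line):
--   counted = Counter(line) #각각의 수가 몇번 나왔는지
--   if 0 in counted:
--     del counted[0]
--   tuple_list = [[k,v] for k,v in counted.items()]
--   sorted_tuple_list = sorted(tuple_list, key=sort_helper)
--   flattened = list(chain.from_iterable(sorted_tuple_list))
--   return flattened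
--
-- def sort_helper(comp):
--   return (comp[1], comp[0])
-- ===== SOURCE B (Python) =====
-- def _runs(vals):
--     # run-length encode: measure the leading run, then recurse on the remainder;
--     # on a sorted list this yields (count, value) pairs with values strictly increasing
--     if not vals:
--         return []
--     v = vals[0]
--     i = 1
--     while i < len(vals) and vals[i] == v:
--         i += 1
--     return [(i, v)] + _runs(vals[i:])
--
--
-- def applyC(board):
--     cols = []
--     for c in range(len(board[0])):
--         # sort the nonzero entries of column c, then run-length encode
--         pairs = _runs(sorted(row[c] for row in board if row[c] != 0))
--         # counting-bucket emission instead of a comparison sort of the pairs: sweep the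
--         # count levels upward; within one level the pairs are already value-ordered
--         maxc = max((p[0] for p in pairs), default=0)
--         flat = []
--         for n in range(1, maxc + 1):
--             for cnt, v in pairs:
--                 if cnt == n:
--                     flat.append(v)
--                     flat.append(cnt)
--         cols.append(flat)
--     largest = max((len(f) for f in cols), default=0)
--     return [[f[k] if k < len(f) else 0 for f in cols] for k in range(largest)]
-- ===== Notes on version B (the rewrite author's own statement) =====
-- stated objective: alternative
-- what changed: B replaces A's Counter-dict + tuple-key comparison sort + double transpose by a sort-free-of-dicts pipeline: it sorts each column's nonzero entries, run-length-encodes the sorted list into (count,value) pairs (values already increasing), emits the pairs by sweeping count levels upward (a counting-bucket pass instead of the (count,value) comparison sort), and builds the output rows directly by indexing, never mutating its argument.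
import Mathlib
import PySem

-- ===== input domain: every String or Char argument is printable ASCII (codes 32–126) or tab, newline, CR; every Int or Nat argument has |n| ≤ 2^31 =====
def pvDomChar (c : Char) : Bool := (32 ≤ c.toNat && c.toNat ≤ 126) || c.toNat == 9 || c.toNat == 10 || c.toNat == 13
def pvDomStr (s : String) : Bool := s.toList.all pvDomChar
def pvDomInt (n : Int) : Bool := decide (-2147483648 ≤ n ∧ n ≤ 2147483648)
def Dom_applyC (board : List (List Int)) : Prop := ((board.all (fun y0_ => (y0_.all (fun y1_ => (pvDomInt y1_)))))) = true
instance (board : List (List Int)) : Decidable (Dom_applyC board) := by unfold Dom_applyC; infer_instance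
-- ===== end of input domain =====

-- B replaces A's Counter dict, tuple-key comparison sort and double transpose by sorting each
-- column's nonzero entries, run-length-encoding the sorted list, emitting pairs by an upward
-- sweep of count levels, and building the output rows directly by indexing (alternative
-- decomposition; B never mutates its argument, A only mutates its own local lists).

-- ===== PORT A =====
-- helper sort_this: Counter the line, delete key 0, sort the [k, v] items by the tuple key
-- (v, k) (Python tuple key → PySem.List.sorted2), flatten with chain.from_iterable
def pvSortThis (line : List Int) : List Int :=
  let counted := PySem.Dict.counter line
  let counted := if counted.contains 0 then counted.erase 0 else counted
  let tupleList := counted.items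
  let sortedTupleList := PySem.List.sorted2 tupleList (fun c => c.2) (fun c => c.1)
  sortedTupleList.flatMap (fun kv => [kv.1, kv.2])

-- applyR's first loop: board[i] = sort_this(board[i]) together with the running largest
def pvApplyRLoop : List (List Int) → Int → (List (List Int)) × Int
  | [], largest => ([], largest)
  | r :: rs, largest =>
    let r' := pvSortThis r
    let largest' := if largest < PySem.List.len r' then PySem.List.len r' else largest
    let rest := pvApplyRLoop rs largest'
    (r' :: rest.1, rest.2)

def pvApplyR (board : List (List Int)) : List (List Int) :=
  let st := pvApplyRLoop board 0
  -- second loop: board[i] = board[i] + [0] * (largest - len(board[i]))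
  st.1.map (fun row => row ++ List.replicate (st.2 - PySem.List.len row).toNat 0)

def applyC (board : List (List Int)) : List (List Int) :=
  let tBoard := (PySem.List.pyRange 0 (PySem.List.len (PySem.List.pyGetD board 0 []))).map
    (fun i => (PySem.List.pyRange 0 (PySem.List.len board)).foldl
      (fun column j => column ++ [PySem.List.pyGetD (PySem.List.pyGetD board j []) i 0]) [])
  let tBoard := pvApplyR tBoard
  let m := PySem.List.len (PySem.List.pyGetD tBoard 0 [])
  let applied0 := (PySem.List.pyRange 0 m).map (fun _ => ([] : List Int))
  (PySem.List.pyRange 0 (PySem.List.len tBoard)).foldl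
    (fun ap j => (PySem.List.pyRange 0 m).foldl
      (fun ap i => PySem.List.pySetD ap i
        (PySem.List.pyGetD ap i [] ++ [PySem.List.pyGetD (PySem.List.pyGetD tBoard j []) i 0])) ap)
    applied0

-- ===== PORT B =====
-- Source B's _runs, ported by hand (no PySem primitive): the while loop counts the leading run of
-- values equal to vals[0] — that run is takeWhile (== v) of the tail, exact on every list —
-- and the recursion continues on the remainder vals[i:] = dropWhile (== v) of the tail
def pvRuns : List Int → List (Int × Int)
  | [] => []
  | v :: rest =>
      (1 + ((rest.takeWhile (fun x => x == v)).length : Int), v)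
        :: pvRuns (rest.dropWhile (fun x => x == v))
  termination_by vals => vals.length
  decreasing_by
    have := List.length_dropWhile_le (p := fun x => x == v) (l := rest)
    simp; omega

-- one column of Source B: sorted nonzero entries, run-length encoded, then the counting-bucket
-- sweep 'for n in range(1, maxc+1): for (cnt, v) in pairs: if cnt == n: append v; append cnt'
def pvColFlatB (board : List (List Int)) (c : Int) : List Int :=
  let vals := PySem.List.sorted
    ((board.map (fun row => PySem.List.pyGetD row c 0)).filter (fun x => !(x == 0)))
    (fun x => x)
  let pairs := pvRuns vals
  let maxc := (pairs.map (fun p => p.1)).foldl max 0   -- max(gen, default=0)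
  (PySem.List.pyRange 1 (maxc + 1) 1).foldl
    (fun flat n => pairs.foldl
      (fun flat p => if p.1 == n then flat ++ [p.2] ++ [p.1] else flat) flat) []

def applyC_alt (board : List (List Int)) : List (List Int) :=
  let cols := (List.range (board.headD []).length).map (fun (c : Nat) => pvColFlatB board (c : Int))
  let largest := (cols.map List.length).foldl max 0   -- max(gen, default=0)
  (List.range largest).map (fun (k : Nat) =>
    cols.map (fun f => if k < f.length then PySem.List.pyGetD f (k : Int) 0 else 0))

-- ===== PRECONDITION & SPEC =====
-- Pre_ excludes exactly the inputs where the Python A raises: an empty board or an empty first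
-- row (IndexError on board[0] resp. t_board[0]) and boards where some row is shorter than the
-- first row (IndexError board[j][i]).
def Pre_applyC (board : List (List Int)) : Prop :=
  board ≠ [] ∧ (board.headD []) ≠ [] ∧ ∀ row ∈ board, (board.headD []).length ≤ row.length
instance (board : List (List Int)) : Decidable (Pre_applyC board) := by unfold Pre_applyC; infer_instance
def pvWitness_applyC : List (List Int) := [[1, 2, 1], [0, 2, 5]]

def Spec_applyC (board : List (List Int)) (out : List (List Int)) : Prop := out = applyC_alt board
instance (board : List (List Int)) (out : List (List Int)) : Decidable (Spec_applyC board out) := by unfold Spec_applyC; infer_instance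

-- ===== CLAIM (what is proved, stated in full; the proofs are below) =====
def Claim_equal_applyC : Prop := ∀ (board : List (List Int)), Dom_applyC board → Pre_applyC board → Spec_applyC board (applyC board)

-- ===== LEMMAS AND PROOFS =====

-- Python's 'if largest < len(r): largest = len(r)' is a running max
theorem pv_if_max (l x : Int) : (if l < x then x else l) = max l x := by
  rcases lt_or_ge l x with h | h
  · rw [if_pos h, max_eq_right h.le]
  · rw [if_neg (not_lt.mpr h), max_eq_left h]

theorem pvApplyRLoop_eq (rows : List (List Int)) : ∀ (lg : Int),
    pvApplyRLoop rows lg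
      = (rows.map pvSortThis,
         rows.foldl (fun l r => max l (PySem.List.len (pvSortThis r))) lg) := by
  induction rows with
  | nil => intro lg; simp [pvApplyRLoop]
  | cons r rs ih => intro lg; simp [pvApplyRLoop, ih, pv_if_max]

theorem pv_foldl_max_cast (rows : List (List Int)) : ∀ (a : Nat),
    rows.foldl (fun l r => max l (PySem.List.len (pvSortThis r))) (a : Int)
      = ((rows.foldl (fun m r => max m (pvSortThis r).length) a : Nat) : Int) := by
  induction rows with
  | nil => intro a; rfl
  | cons r rs ih =>
    intro a
    simp only [List.foldl_cons, PySem.List.len_eq]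
    simp only [PySem.List.len_eq] at ih
    rw [← Nat.cast_max, ih]

theorem pv_le_foldl_max {α : Type} (g : α → Nat) (rows : List α) : ∀ (a : Nat),
    (a ≤ rows.foldl (fun m r => max m (g r)) a)
    ∧ (∀ r ∈ rows, g r ≤ rows.foldl (fun m r => max m (g r)) a) := by
  induction rows with
  | nil => intro a; simp
  | cons x xs ih =>
    intro a
    refine ⟨le_trans (le_max_left a (g x)) (ih (max a (g x))).1, ?_⟩
    intro r hr
    rw [List.mem_cons] at hr
    rcases hr with rfl | hr
    · exact le_trans (le_max_right a (g r)) (ih (max a (g r))).1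
    · exact (ih (max a (g x))).2 r hr

theorem pv_pad_getD (flat : List Int) (M k : Nat) :
    (flat ++ List.replicate ((M : Int) - PySem.List.len flat).toNat 0).getD k 0
      = flat.getD k 0 := by
  rcases lt_or_ge k flat.length with hk | hk
  · exact List.getD_append _ _ _ _ hk
  · rw [List.getD_eq_getElem?_getD, List.getD_eq_getElem?_getD,
      List.getElem?_append_right hk, List.getElem?_eq_none hk]
    rcases lt_or_ge (k - flat.length) (((M : Int) - PySem.List.len flat).toNat) with h2 | h2
    · rw [List.getElem?_replicate]
      have h3 : k - flat.length < (↑M - PySem.List.len flat).toNat := h2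
      simp only [PySem.List.len_eq] at h3
      rw [if_pos (by omega)]
      rfl
    · rw [List.getElem?_eq_none (by simpa using h2)]

theorem pv_pad_length (flat : List Int) (M : Nat) (h : flat.length ≤ M) :
    (flat ++ List.replicate ((M : Int) - PySem.List.len flat).toNat 0).length = M := by
  simp [PySem.List.len_eq]
  omega

theorem pv_add_filter (q : Int → Bool) (s : List Int) (x : Int) :
    (PySem.Set.add s x).filter q
      = if q x then PySem.Set.add (s.filter q) x else s.filter q := by
  simp only [PySem.Set.add]
  by_cases hm : x ∈ s
  · by_cases hq : q x
    · have : x ∈ List.filter q s := List.mem_filter.mpr ⟨hm, hq⟩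
      simp [hm, hq, this]
    · simp [hm, hq]
  · by_cases hq : q x
    · have : x ∉ List.filter q s := fun h => hm (List.mem_filter.mp h).1
      simp [hm, hq, this, List.filter_append]
    · simp [hm, hq, List.filter_append]

theorem pv_foldl_add_filter (q : Int → Bool) (xs : List Int) : ∀ (s : List Int),
    (xs.foldl PySem.Set.add s).filter q
      = (xs.filter q).foldl PySem.Set.add (s.filter q) := by
  induction xs with
  | nil => intro s; rfl
  | cons x xs ih =>
    intro s
    rw [List.foldl_cons, ih (PySem.Set.add s x), pv_add_filter]
    by_cases hq : q x
    · simp [hq]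
    · simp [hq]

theorem pv_ofList_filter (q : Int → Bool) (xs : List Int) :
    PySem.Set.ofList (xs.filter q) = (PySem.Set.ofList xs).filter q := by
  have := pv_foldl_add_filter q xs []
  simp only [PySem.Set.ofList, PySem.Set.empty] at *
  rw [this]
  rfl

-- A's Counter-then-delete-0 items agree, item list for item list, with the Counter of the
-- nonzero-filtered line
theorem pv_counter_items (xs : List Int) :
    (if (PySem.Dict.counter xs).contains 0 then (PySem.Dict.counter xs).erase 0
     else PySem.Dict.counter xs).items
      = (PySem.Dict.counter (xs.filter (fun x => !(x == 0)))).items := by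
  have hfilter : (if (PySem.Dict.counter xs).contains 0 then (PySem.Dict.counter xs).erase 0
      else PySem.Dict.counter xs).items
        = (PySem.Dict.counter xs).items.filter (fun p => !(p.1 == 0)) := by
    by_cases hc : (PySem.Dict.counter xs).contains 0
    · rw [if_pos hc]; rfl
    · rw [if_neg hc, Eq.comm, List.filter_eq_self]
      intro p hp
      have hk : p.1 ∈ (PySem.Dict.counter xs).keys := PySem.Dict.mem_keys_of_mem_items _ hp
      rw [PySem.Dict.keys_counter, PySem.Set.mem_ofList] at hk
      have h0 : (0 : Int) ∉ xs := by
        intro h0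
        exact hc (by rw [PySem.Dict.contains_counter]; exact List.contains_iff_mem.mpr h0)
      have hne : p.1 ≠ 0 := fun he => h0 (he ▸ hk)
      simp [hne]
  rw [hfilter, PySem.Dict.items_counter, PySem.Dict.items_counter, List.filter_map,
    pv_ofList_filter]
  apply List.map_congr_left
  intro k hk
  have hq : ((fun x => !(x == 0)) k) = true := (List.mem_filter.mp hk).2
  rw [List.count_filter (p := fun x => !(x == 0)) (a := k) (l := xs) hq]

theorem pv_tboard_eq (board : List (List Int)) :
    (PySem.List.pyRange 0 (PySem.List.len (PySem.List.pyGetD board 0 []))).map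
      (fun i => (PySem.List.pyRange 0 (PySem.List.len board)).foldl
        (fun column j => column ++ [PySem.List.pyGetD (PySem.List.pyGetD board j []) i 0]) [])
    = (List.range (board.headD []).length).map
        (fun c : Nat => board.map (fun row => PySem.List.pyGetD row (c : Int) 0)) := by
  have h0 : PySem.List.pyGetD board 0 [] = board.headD [] := by
    rw [PySem.List.pyGetD_zero]; cases board <;> rfl
  rw [h0, PySem.List.len_eq (board.headD []),
    PySem.List.pyRange_zero_nat ((board.headD []).length), List.map_map]
  apply List.map_congr_left
  intro c _
  show (PySem.List.pyRange 0 (PySem.List.len board)).foldl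
      (fun column j => column ++ [PySem.List.pyGetD (PySem.List.pyGetD board j []) (c : Int) 0]) []
    = board.map (fun row => PySem.List.pyGetD row (c : Int) 0)
  rw [PySem.List.foldl_append_singleton_eq_map
    (fun j => PySem.List.pyGetD (PySem.List.pyGetD board j []) (c : Int) 0), List.nil_append]
  conv_rhs => rw [← PySem.List.map_pyGetD_pyRange_zero board ([] : List Int)]
  rw [List.map_map]
  rfl

theorem pv_inner_fold (g : Int → Int) (todo : List (List Int)) : ∀ (done : List (List Int)),
    (PySem.List.pyRange (done.length : Int) ((done.length + todo.length : Nat) : Int)).foldl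
        (fun a i => PySem.List.pySetD a i (PySem.List.pyGetD a i [] ++ [g i])) (done ++ todo)
      = done ++ (todo.zipIdx done.length).map (fun p => p.1 ++ [g (p.2 : Int)]) := by
  induction todo with
  | nil =>
    intro done
    have hnil : PySem.List.pyRange (done.length : Int)
        ((done.length + ([] : List (List Int)).length : Nat) : Int) = [] :=
      PySem.List.pyRange_one_eq_nil (by simp)
    rw [hnil]
    simp
  | cons x rest ih =>
    intro done
    have hlt : (done.length : Int) < ((done.length + (x :: rest).length : Nat) : Int) := by
      have : done.length < done.length + (x :: rest).length := by simp
      exact_mod_cast this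
    rw [PySem.List.pyRange_one_cons hlt, List.foldl_cons]
    have hget : PySem.List.pyGetD (done ++ x :: rest) (done.length : Int) [] = x := by
      rw [PySem.List.pyGetD_natCast, List.getD_eq_getElem?_getD,
        List.getElem?_append_right (le_refl _)]
      simp
    have hset : PySem.List.pySetD (done ++ x :: rest) (done.length : Int)
        (x ++ [g (done.length : Int)]) = done ++ (x ++ [g (done.length : Int)]) :: rest := by
      rw [PySem.List.pySetD_natCast, List.set_append]
      simp
    rw [hget, hset]
    have hrange : PySem.List.pyRange ((done.length : Int) + 1)
        ((done.length + (x :: rest).length : Nat) : Int)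
      = PySem.List.pyRange (((done ++ [x ++ [g (done.length : Int)]]).length : Nat) : Int)
          (((done ++ [x ++ [g (done.length : Int)]]).length + rest.length : Nat) : Int) := by
      congr 1 <;> push_cast <;> simp <;> try omega
    have happ : done ++ (x ++ [g (done.length : Int)]) :: rest
        = (done ++ [x ++ [g (done.length : Int)]]) ++ rest := by
      simp
    rw [hrange, happ, ih (done ++ [x ++ [g (done.length : Int)]])]
    simp [List.zipIdx_cons]

theorem pv_zipIdx_range (M : Nat) :
    (List.range M).zipIdx 0 = (List.range M).map (fun k => (k, k)) := by
  apply List.ext_getElem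
  · simp
  · intro i h1 h2
    simp [List.getElem_zipIdx]

theorem pv_inner_fold_range (g : Int → Int) (f : Nat → List Int) (M : Nat) :
    (PySem.List.pyRange 0 (M : Int)).foldl
        (fun a i => PySem.List.pySetD a i (PySem.List.pyGetD a i [] ++ [g i]))
        ((List.range M).map f)
      = (List.range M).map (fun k => f k ++ [g (k : Int)]) := by
  have := pv_inner_fold g ((List.range M).map f) []
  simp only [List.nil_append, List.length_nil, List.length_map, List.length_range,
    Nat.zero_add, Nat.cast_zero] at this
  rw [this, List.zipIdx_map, pv_zipIdx_range, List.map_map, List.map_map]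
  rfl

theorem pv_outer_fold (cols : List (List Int)) (M : Nat) : ∀ (f : Nat → List Int),
    cols.foldl (fun ap col => (PySem.List.pyRange 0 (M : Int)).foldl
        (fun a i => PySem.List.pySetD a i
          (PySem.List.pyGetD a i [] ++ [PySem.List.pyGetD col i 0])) ap)
      ((List.range M).map f)
    = (List.range M).map
        (fun k => f k ++ cols.map (fun col => PySem.List.pyGetD col (k : Int) 0)) := by
  induction cols with
  | nil => intro f; simp
  | cons col cols ih =>
    intro f
    simp only [List.foldl_cons, List.map_cons]
    rw [pv_inner_fold_range (fun i => PySem.List.pyGetD col i 0) f M,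
      ih (fun k => f k ++ [PySem.List.pyGetD col (k : Int) 0])]
    simp

-- ---------- B-side: the run-length encoding of a sorted list ----------

-- insertion with a pointwise-equal comparison is the same insertion
theorem pv_insertBy_congr (p q : (Int × Int) → (Int × Int) → Bool) (x : Int × Int) :
    ∀ (acc : List (Int × Int)), (∀ b ∈ acc, p x b = q x b) →
    PySem.List.insertBy p x acc = PySem.List.insertBy q x acc := by
  intro acc
  induction acc with
  | nil => intro _; rfl
  | cons y ys ih =>
    intro h
    have hy := h y List.mem_cons_self
    simp only [PySem.List.insertBy, hy]
    by_cases hq : q x y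
    · simp [hq]
    · simp [hq, ih (fun b hb => h b (List.mem_cons_of_mem _ hb))]

theorem pv_foldl_insertBy_congr (p q : (Int × Int) → (Int × Int) → Bool)
    (l : List (Int × Int)) (h : ∀ a ∈ l, ∀ b ∈ l, p a b = q a b) :
    ∀ (xs : List (Int × Int)), xs ⊆ l → ∀ (acc : List (Int × Int)), acc ⊆ l →
    xs.foldl (fun acc x => PySem.List.insertBy p x acc) acc
      = xs.foldl (fun acc x => PySem.List.insertBy q x acc) acc := by
  intro xs
  induction xs with
  | nil => intro _ acc _; rfl
  | cons x xs ih =>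
    intro hxs acc hacc
    have hx : x ∈ l := hxs List.mem_cons_self
    simp only [List.foldl_cons]
    rw [pv_insertBy_congr p q x acc (fun b hb => h x hx b (hacc hb))]
    apply ih (fun a ha => hxs (List.mem_cons_of_mem _ ha))
    intro a ha
    rcases (PySem.List.mem_insertBy q x a acc).mp ha with rfl | ha
    · exact hx
    · exact hacc ha

-- Python's lexicographic (count, value) comparison as a single linear key, valid while the
-- values are bounded by 2^31 (the task domain)
theorem pv_lex_combo (c1 v1 c2 v2 : Int)
    (h1 : -2147483648 ≤ v1 ∧ v1 ≤ 2147483648) (h2 : -2147483648 ≤ v2 ∧ v2 ≤ 2147483648) :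
    (decide (c1 < c2) || (!decide (c2 < c1) && decide (v1 < v2)))
      = decide (c1 * 8589934592 + v1 < c2 * 8589934592 + v2) := by
  by_cases ha : c1 < c2 <;> by_cases hb : c2 < c1 <;> by_cases hc : v1 < v2 <;>
    simp [ha, hb, hc] <;> omega

-- sorted2 items (count, value) is sorted with the combined key on bounded values
theorem pv_sorted2_eq_sorted_combo (items : List (Int × Int))
    (hb : ∀ kv ∈ items, -2147483648 ≤ kv.1 ∧ kv.1 ≤ 2147483648) :
    PySem.List.sorted2 items (fun kv => kv.2) (fun kv => kv.1) false
      = PySem.List.sorted items (fun kv => kv.2 * 8589934592 + kv.1) false := by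
  rw [PySem.List.sorted_eq_foldl_insertBy]
  show items.foldl (fun acc x => PySem.List.insertBy
      (fun a b => decide (a.2 < b.2) || (!decide (b.2 < a.2) && decide (a.1 < b.1))) x acc) []
    = _
  apply pv_foldl_insertBy_congr _ _ items _ items (fun _ h => h) [] (by simp)
  intro a ha b hbm
  exact pv_lex_combo a.2 a.1 b.2 b.1 (hb a ha) (hb b hbm)

-- decomposition facts for one step of pvRuns on a sorted list
theorem pv_dropWhile_head_not (p : Int → Bool) : ∀ (l : List Int) (f : Int) (d' : List Int),
    l.dropWhile p = f :: d' → p f = false := by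
  intro l
  induction l with
  | nil => intro f d' h; simp at h
  | cons x xs ih =>
    intro f d' h
    by_cases hx : p x
    · rw [List.dropWhile_cons_of_pos hx] at h
      exact ih f d' h
    · rw [List.dropWhile_cons_of_neg hx] at h
      cases h
      exact Bool.eq_false_iff.mpr hx

theorem pv_sorted_head_run (v : Int) (rest : List Int)
    (hs : (v :: rest).Pairwise (· ≤ ·)) :
    (∀ x ∈ rest.takeWhile (fun x => x == v), x = v)
    ∧ (∀ x ∈ rest.dropWhile (fun x => x == v), v < x)
    ∧ (rest.dropWhile (fun x => x == v)).Pairwise (· ≤ ·) := by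
  have hvle : ∀ x ∈ rest, v ≤ x := fun x hx => (List.pairwise_cons.mp hs).1 x hx
  have hrp : rest.Pairwise (· ≤ ·) := (List.pairwise_cons.mp hs).2
  have hdp : (rest.dropWhile (fun x => x == v)).Pairwise (· ≤ ·) :=
    List.Pairwise.sublist (List.dropWhile_sublist (fun x => x == v)) hrp
  refine ⟨fun x hx => by simpa using (List.mem_takeWhile_imp hx), ?_, hdp⟩
  cases hd : rest.dropWhile (fun x => x == v) with
  | nil => intro x hx; simp at hx
  | cons f d' =>
    have hfne : f ≠ v := by
      have := pv_dropWhile_head_not (fun x => x == v) rest f d' hd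
      simpa using this
    have hfmem : f ∈ rest := (List.dropWhile_sublist _).mem (hd ▸ List.mem_cons_self)
    have hvf : v < f := lt_of_le_of_ne (hvle f hfmem) (Ne.symm hfne)
    intro x hx
    rcases List.mem_cons.mp hx with rfl | hx
    · exact hvf
    · have hfd : (f :: d').Pairwise (· ≤ ·) := hd ▸ hdp
      exact lt_of_lt_of_le hvf ((List.pairwise_cons.mp hfd).1 x hx)

-- v followed by a run of copies of v followed by a v-free tail, as a Python set
theorem pv_foldl_add_cons (v : Int) (d : List Int) (hv : v ∉ d) : ∀ (s : List Int),
    d.foldl PySem.Set.add (v :: s) = v :: d.foldl PySem.Set.add s := by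
  induction d with
  | nil => intro s; rfl
  | cons x d ih =>
    intro s
    have hxv : x ≠ v := fun h => hv (h ▸ List.mem_cons_self)
    have hv' : v ∉ d := fun h => hv (List.mem_cons_of_mem _ h)
    simp only [List.foldl_cons]
    have : PySem.Set.add (v :: s) x = v :: PySem.Set.add s x := by
      simp only [PySem.Set.add]
      by_cases hm : x ∈ s
      · simp [hm, List.mem_cons, hxv]
      · simp [hm, List.mem_cons, hxv]
    rw [this, ih hv']

theorem pv_ofList_run (v : Int) (t d : List Int)
    (ht : ∀ x ∈ t, x = v) (hd : v ∉ d) :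
    PySem.Set.ofList (v :: (t ++ d)) = v :: PySem.Set.ofList d := by
  show (v :: (t ++ d)).foldl PySem.Set.add [] = v :: d.foldl PySem.Set.add []
  rw [List.foldl_cons, List.foldl_append]
  have h1 : PySem.Set.add [] v = [v] := rfl
  have h2 : t.foldl PySem.Set.add [v] = [v] := by
    induction t with
    | nil => rfl
    | cons x t iht =>
      have hx : x = v := ht x List.mem_cons_self
      rw [List.foldl_cons]
      have : PySem.Set.add [v] x = [v] := by
        simp [PySem.Set.add, hx]
      rw [this]
      exact iht (fun y hy => ht y (List.mem_cons_of_mem _ hy))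
  rw [h1, h2]
  exact pv_foldl_add_cons v d hd []

-- pvRuns of a sorted list: one (count, value) pair per distinct value, values strictly
-- increasing, counts exact
theorem pv_runs_sorted : ∀ (zs : List Int), zs.Pairwise (· ≤ ·) →
    pvRuns zs = (PySem.Set.ofList zs).map (fun k => ((zs.count k : Int), k))
    ∧ (PySem.Set.ofList zs).Pairwise (· < ·) := by
  intro zs
  induction zs using pvRuns.induct with
  | case1 => intro _; exact ⟨by simp [pvRuns], List.Pairwise.nil⟩
  | case2 v rest ih =>
    intro hs
    obtain ⟨ht, hdlt, hdp⟩ := pv_sorted_head_run v rest hs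
    set t := rest.takeWhile (fun x => x == v) with htdef
    set d := rest.dropWhile (fun x => x == v) with hddef
    have hrest : t ++ d = rest := List.takeWhile_append_dropWhile
    have hvd : v ∉ d := fun h => lt_irrefl v (hdlt v h)
    obtain ⟨ihEq, ihP⟩ := ih hdp
    have hofl : PySem.Set.ofList (v :: rest) = v :: PySem.Set.ofList d := by
      rw [← hrest]; exact pv_ofList_run v t d ht hvd
    constructor
    · rw [pvRuns, hofl, List.map_cons]
      simp only [← htdef]
      congr 1
      · have hcv : (v :: rest).count v = 1 + t.length := by
          rw [← hrest, List.count_cons_self, List.count_append]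
          have h1 : t.count v = t.length := List.count_eq_length.mpr (fun b hb => (ht b hb).symm)
          have h2 : d.count v = 0 := List.count_eq_zero.mpr hvd
          omega
        rw [hcv]
        simp
      · rw [ihEq]
        apply List.map_congr_left
        intro k hk
        have hkd : k ∈ d := (PySem.Set.mem_ofList d k).mp hk
        have hkv : k ≠ v := fun h => hvd (h ▸ hkd)
        have hkt : k ∉ t := fun h => hkv (ht k h)
        have : (v :: rest).count k = d.count k := by
          rw [← hrest]
          simp only [List.count_cons, List.count_append, List.count_eq_zero.mpr hkt]
          simp [Ne.symm hkv]
        rw [this]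
    · rw [hofl]
      exact List.pairwise_cons.mpr
        ⟨fun k hk => hdlt k ((PySem.Set.mem_ofList d k).mp hk), ihP⟩

-- the counting-bucket sweep is a permutation of the pair list
theorem pv_buckets_perm : ∀ (ns : List Int), ns.Nodup → ∀ (l : List (Int × Int)),
    (ns.flatMap (fun n => l.filter (fun p => p.1 == n))).Perm
      (l.filter (fun p => decide (p.1 ∈ ns))) := by
  intro ns
  induction ns with
  | nil => intro _ l; simp
  | cons n ns ih =>
    intro hnd l
    have hn : n ∉ ns := (List.nodup_cons.mp hnd).1
    have hnd' : ns.Nodup := (List.nodup_cons.mp hnd).2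
    rw [List.flatMap_cons]
    set r : (Int × Int) → Bool := fun p => decide (p.1 ∈ n :: ns) with hr
    set l' := l.filter r with hl'
    have h1 : l.filter (fun p => p.1 == n) = l'.filter (fun p => p.1 == n) := by
      rw [hl', List.filter_filter]
      apply List.filter_congr
      intro p _
      by_cases hp : p.1 = n
      · simp [hr, hp]
      · simp [hp]
    have h2 : l.filter (fun p => decide (p.1 ∈ ns)) = l'.filter (fun p => !(p.1 == n)) := by
      rw [hl', List.filter_filter]
      apply List.filter_congr
      intro p _
      by_cases hp : p.1 = n
      · simp [hp, hn]
      · simp [hr, hp]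
    have hstep1 : (l.filter (fun p => p.1 == n)
          ++ ns.flatMap (fun n => l.filter (fun p => p.1 == n))).Perm
        (l.filter (fun p => p.1 == n) ++ l.filter (fun p => decide (p.1 ∈ ns))) :=
      List.Perm.append_left _ (ih hnd' l)
    refine hstep1.trans ?_
    rw [h1, h2]
    exact List.filter_append_perm _ l'

-- values occurring in a column stay in the task domain
theorem pv_pyGetD_bound (row : List Int) (c : Int)
    (h : ∀ x ∈ row, -2147483648 ≤ x ∧ x ≤ 2147483648) :
    -2147483648 ≤ PySem.List.pyGetD row c 0 ∧ PySem.List.pyGetD row c 0 ≤ 2147483648 := by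
  simp only [PySem.List.pyGetD]
  cases hg : PySem.List.pyGet? row c with
  | none => simp
  | some x =>
    have : x ∈ row := by
      simp only [PySem.List.pyGet?, PySem.List.pyIdx?] at hg
      split at hg
      · split at hg
        · exact List.mem_of_getElem? (by simpa using hg)
        · simp at hg
      · split at hg
        · exact List.mem_of_getElem? (by simpa using hg)
        · simp at hg
    simpa using h x this

-- THE CORE: Source B's sorted-runs-buckets column equals A's Counter-sort-flatten column
theorem pvColFlatB_eq (board : List (List Int)) (c : Nat)
    (hb : ∀ row ∈ board, ∀ x ∈ row, -2147483648 ≤ x ∧ x ≤ 2147483648) :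
    pvColFlatB board (c : Int) = pvSortThis (board.map (fun row => PySem.List.pyGetD row (c : Int) 0)) := by
  set xs := board.map (fun row => PySem.List.pyGetD row (c : Int) 0) with hxs
  have hxb : ∀ x ∈ xs, -2147483648 ≤ x ∧ x ≤ 2147483648 := by
    intro x hx
    rw [hxs] at hx
    obtain ⟨row, hrow, rfl⟩ := List.mem_map.mp hx
    exact pv_pyGetD_bound row _ (hb row hrow)
  set ys := xs.filter (fun x => !(x == 0)) with hys
  have hyb : ∀ x ∈ ys, -2147483648 ≤ x ∧ x ≤ 2147483648 :=
    fun x hx => hxb x (List.mem_of_mem_filter hx)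
  set vals := PySem.List.sorted ys (fun x => x) false with hvals
  have hvperm : vals.Perm ys := PySem.List.sorted_perm ys (fun x => x) false
  have hsorted : vals.Pairwise (· ≤ ·) := PySem.List.sorted_pairwise ys (fun x => x)
  obtain ⟨hpairsEq, hofP⟩ := pv_runs_sorted vals hsorted
  set pairs := pvRuns vals with hpairs
  set maxc := (pairs.map (fun p => p.1)).foldl max 0 with hmaxc
  set ns := PySem.List.pyRange 1 (maxc + 1) 1 with hns
  -- every count lies in the swept range
  have hcnt1 : ∀ p ∈ pairs, 1 ≤ p.1 := by
    intro p hp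
    rw [hpairsEq] at hp
    obtain ⟨k, hk, rfl⟩ := List.mem_map.mp hp
    have h0 : 0 < vals.count k := List.count_pos_iff.mpr ((PySem.Set.mem_ofList vals k).mp hk)
    show (1 : Int) ≤ ((vals.count k : Nat) : Int)
    exact_mod_cast h0
  have hcntm : ∀ p ∈ pairs, p.1 ≤ maxc := by
    intro p hp
    have h := (PySem.List.le_foldl_max_int (pairs.map (fun p => p.1)) (fun x => x) 0).2
      p.1 (List.mem_map.mpr ⟨p, hp, rfl⟩)
    calc p.1 ≤ (pairs.map (fun p => p.1)).foldl (fun acc y => max acc y) 0 := h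
      _ = maxc := rfl
  have hin : ∀ p ∈ pairs, (decide (p.1 ∈ ns)) = true := by
    intro p hp
    rw [hns]
    have hmem : p.1 ∈ PySem.List.pyRange 1 (maxc + 1) 1 :=
      (@PySem.List.mem_pyRange_one 1 (maxc + 1) p.1).mpr
        ⟨hcnt1 p hp, by have := hcntm p hp; omega⟩
    simpa using hmem
  set Wpairs := ns.flatMap (fun n => pairs.filter (fun p => p.1 == n)) with hW
  -- the nested bucket loops compute Wpairs, flattened pairwise
  have hflat : (ns.foldl (fun flat n => pairs.foldl
        (fun flat p => if p.1 == n then flat ++ [p.2] ++ [p.1] else flat) flat) [])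
      = Wpairs.flatMap (fun p => [p.2, p.1]) := by
    have hinner : ∀ (acc : List Int) (n : Int), pairs.foldl
        (fun flat p => if p.1 == n then flat ++ [p.2] ++ [p.1] else flat) acc
        = acc ++ (pairs.filter (fun p => p.1 == n)).flatMap (fun p => [p.2, p.1]) := by
      intro acc n
      have h1 : (fun (flat : List Int) (p : Int × Int) =>
            if p.1 == n then flat ++ [p.2] ++ [p.1] else flat)
          = (fun flat p => if (fun (p : Int × Int) => p.1 == n) p
              then (fun (flat : List Int) (p : Int × Int) => flat ++ [p.2, p.1]) flat p
              else flat) := by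
        funext flat p
        by_cases h : p.1 == n <;> simp [h]
      rw [h1, PySem.List.foldl_if_eq_foldl_filter, PySem.List.foldl_append_eq_flatMap]
    have h2 : ∀ (acc : List Int), ns.foldl (fun flat n => pairs.foldl
          (fun flat p => if p.1 == n then flat ++ [p.2] ++ [p.1] else flat) flat) acc
        = acc ++ ns.flatMap (fun n =>
            (pairs.filter (fun p => p.1 == n)).flatMap (fun p => [p.2, p.1])) := by
      intro acc
      have h3 : (fun (flat : List Int) (n : Int) => pairs.foldl
            (fun flat p => if p.1 == n then flat ++ [p.2] ++ [p.1] else flat) flat)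
          = (fun flat n => flat ++
              (pairs.filter (fun p => p.1 == n)).flatMap (fun p => [p.2, p.1])) := by
        funext flat n
        exact hinner flat n
      rw [h3, PySem.List.foldl_append_eq_flatMap]
    rw [h2, List.nil_append, hW, List.flatMap_assoc]
  -- Wpairs is a permutation of the run pairs
  have hWperm : Wpairs.Perm pairs := by
    have h := pv_buckets_perm ns (PySem.List.nodup_pyRange_one 1 (maxc + 1)) pairs
    rwa [List.filter_eq_self.mpr hin] at h
  -- bounds on the values occurring in pairs
  have hpval : ∀ p ∈ pairs, p.2 ∈ ys := by
    intro p hp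
    rw [hpairsEq] at hp
    obtain ⟨k, hk, rfl⟩ := List.mem_map.mp hp
    exact hvperm.mem_iff.mp ((PySem.Set.mem_ofList vals k).mp hk)
  -- pairs have strictly increasing values
  have hpinc : pairs.Pairwise (fun a b => a.2 < b.2) := by
    rw [hpairsEq, List.pairwise_map]
    exact hofP
  -- the items A sorts
  have hitems : pvSortThis xs = (PySem.List.sorted2
      ((PySem.Set.ofList ys).map (fun k => (k, ((ys.count k : Nat) : Int))))
      (fun kv => kv.2) (fun kv => kv.1) false).flatMap (fun kv => [kv.1, kv.2]) := by
    show ((PySem.List.sorted2 (if (PySem.Dict.counter xs).contains 0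
        then (PySem.Dict.counter xs).erase 0 else PySem.Dict.counter xs).items
        (fun kv => kv.2) (fun kv => kv.1) false).flatMap (fun kv => [kv.1, kv.2])) = _
    rw [pv_counter_items xs, ← hys, PySem.Dict.items_counter]
  set items := (PySem.Set.ofList ys).map (fun k => (k, ((ys.count k : Nat) : Int))) with hitemsdef
  have hib : ∀ kv ∈ items, -2147483648 ≤ kv.1 ∧ kv.1 ≤ 2147483648 := by
    intro kv hkv
    rw [hitemsdef] at hkv
    obtain ⟨k, hk, rfl⟩ := List.mem_map.mp hkv
    exact hyb k ((PySem.Set.mem_ofList ys k).mp hk)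
  -- sorted2 items (count, value) equals the bucket sweep's pair order, swapped
  have hmain : PySem.List.sorted2 items (fun kv => kv.2) (fun kv => kv.1) false
      = Wpairs.map (fun p => (p.2, p.1)) := by
    rw [pv_sorted2_eq_sorted_combo items hib]
    apply PySem.List.sorted_eq_of_perm_of_pairwise_lt
    · -- permutation
      have h1 : (Wpairs.map (fun p => (p.2, p.1))).Perm (pairs.map (fun p => (p.2, p.1))) :=
        List.Perm.map _ hWperm
    -- pairs, swapped, are exactly the items over the distinct sorted values
      have h2 : pairs.map (fun p => (p.2, p.1))
          = (PySem.Set.ofList vals).map (fun k => (k, ((vals.count k : Nat) : Int))) := by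
        rw [hpairsEq, List.map_map]
        rfl
      have h3 : (PySem.Set.ofList vals).Perm (PySem.Set.ofList ys) := by
        rw [List.perm_ext_iff_of_nodup (PySem.Set.nodup_ofList vals) (PySem.Set.nodup_ofList ys)]
        intro a
        rw [PySem.Set.mem_ofList, PySem.Set.mem_ofList]
        exact hvperm.mem_iff
      have h4 : ((PySem.Set.ofList vals).map (fun k => (k, ((vals.count k : Nat) : Int)))).Perm
          items := by
        have h5 : (PySem.Set.ofList vals).map (fun k => (k, ((vals.count k : Nat) : Int)))
            = (PySem.Set.ofList vals).map (fun k => (k, ((ys.count k : Nat) : Int))) := by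
          apply List.map_congr_left
          intro k _
          rw [hvperm.count_eq k]
        rw [h5, hitemsdef]
        exact List.Perm.map _ h3
      rw [h2] at h1
      exact h1.trans h4
    · -- strict order under the combined key
      rw [List.pairwise_map]
      show Wpairs.Pairwise (fun a b => a.1 * 8589934592 + a.2 < b.1 * 8589934592 + b.2)
      rw [hW, List.flatMap_def, List.pairwise_flatten]
      constructor
      · -- within one count level: equal counts, strictly increasing values
        intro l hl
        obtain ⟨n, _, rfl⟩ := List.mem_map.mp hl
        have hsub : (pairs.filter (fun p => p.1 == n)).Pairwise (fun a b => a.2 < b.2) :=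
          List.Pairwise.sublist List.filter_sublist hpinc
        apply List.Pairwise.imp_of_mem _ hsub
        intro a b ha hb hab
        have ha1 : a.1 = n := by simpa using (List.mem_filter.mp ha).2
        have hb1 : b.1 = n := by simpa using (List.mem_filter.mp hb).2
        rw [ha1, hb1]
        omega
      · -- across count levels: counts strictly increase, values stay bounded
        rw [List.pairwise_map]
        apply List.Pairwise.imp_of_mem _ (PySem.List.pairwise_lt_pyRange_one 1 (maxc + 1))
        intro n1 n2 _ _ hlt x hx y hy
        have hx1 : x.1 = n1 := by simpa using (List.mem_filter.mp hx).2
        have hy1 : y.1 = n2 := by simpa using (List.mem_filter.mp hy).2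
        have hxv := hyb x.2 (hpval x (List.mem_of_mem_filter hx))
        have hyv := hyb y.2 (hpval y (List.mem_of_mem_filter hy))
        rw [hx1, hy1]
        omega
  -- assemble
  show (PySem.List.pyRange 1 (maxc + 1) 1).foldl (fun flat n => pairs.foldl
      (fun flat p => if p.1 == n then flat ++ [p.2] ++ [p.1] else flat) flat) []
    = pvSortThis xs
  rw [← hns, hflat, hitems, hmain, List.flatMap_map]

theorem pv_main (board : List (List Int))
    (hb : ∀ row ∈ board, ∀ x ∈ row, -2147483648 ≤ x ∧ x ≤ 2147483648) :
    applyC board = applyC_alt board := by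
  simp only [applyC, applyC_alt, pvApplyR]
  rw [pv_tboard_eq board]
  set nc := (board.headD []).length with hnc
  set tB := (List.range nc).map
    (fun c : Nat => board.map (fun row => PySem.List.pyGetD row (c : Int) 0)) with htB
  rw [pvApplyRLoop_eq tB 0]
  have hcast := pv_foldl_max_cast tB 0
  simp only [Nat.cast_zero] at hcast
  rw [hcast]
  set MN := tB.foldl (fun m r => max m (pvSortThis r).length) 0 with hMN
  set L := tB.map pvSortThis with hL
  have hcols : (List.range nc).map (fun (c : Nat) => pvColFlatB board (c : Int)) = L := by
    rw [hL, htB, List.map_map]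
    apply List.map_congr_left
    intro c _
    exact pvColFlatB_eq board c hb
  rw [hcols]
  have hlarge : (L.map List.length).foldl max 0 = MN := by
    rw [hL, hMN, List.foldl_map, List.foldl_map]
  rw [hlarge]
  have hbnd : ∀ fl ∈ L, fl.length ≤ MN := by
    intro fl hfl
    rw [hL] at hfl
    obtain ⟨r, hr, rfl⟩ := List.mem_map.mp hfl
    exact (pv_le_foldl_max (fun r => (pvSortThis r).length) tB 0).2 r hr
  by_cases h0 : nc = 0
  · have htB0 : tB = [] := by rw [htB, h0]; rfl
    have hL0 : L = [] := by rw [hL, htB0]; rfl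
    have hMN0 : MN = 0 := by rw [hMN, htB0]; rfl
    rw [hL0, hMN0]
    simp [PySem.List.pyRange_one_eq_nil]
  · have hLne : L ≠ [] := by
      rw [hL, htB]
      simp only [List.map_map, ne_eq, List.map_eq_nil_iff, List.range_eq_nil]
      exact h0
    obtain ⟨fl0, L', hL0⟩ := List.exists_cons_of_ne_nil hLne
    have hm : PySem.List.len (PySem.List.pyGetD
        (L.map (fun row => row ++ List.replicate ((MN : Int) - PySem.List.len row).toNat 0)) 0 [])
        = (MN : Int) := by
      rw [hL0, List.map_cons, PySem.List.pyGetD_zero_cons, PySem.List.len_eq,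
        pv_pad_length fl0 MN (hbnd fl0 (hL0 ▸ List.mem_cons_self))]
    rw [hm]
    set P := L.map (fun row => row ++ List.replicate ((MN : Int) - PySem.List.len row).toNat 0)
      with hP
    rw [PySem.List.foldl_pyRange_zero_pyGetD P ([] : List Int)
        (fun ap col => (PySem.List.pyRange 0 ((MN : Nat) : Int)).foldl
          (fun ap i => PySem.List.pySetD ap i
            (PySem.List.pyGetD ap i [] ++ [PySem.List.pyGetD col i 0])) ap)
        ((PySem.List.pyRange 0 ((MN : Nat) : Int)).map (fun _ => ([] : List Int)))]
    have hinit : (PySem.List.pyRange 0 ((MN : Nat) : Int)).map (fun _ => ([] : List Int))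
        = (List.range MN).map (fun _ => ([] : List Int)) := by
      rw [PySem.List.pyRange_zero_nat MN, List.map_map]
      rfl
    rw [hinit, pv_outer_fold P MN]
    apply List.map_congr_left
    intro k _
    rw [List.nil_append]
    rw [hP, List.map_map]
    apply List.map_congr_left
    intro fl hfl
    show PySem.List.pyGetD (fl ++ List.replicate ((MN : Int) - PySem.List.len fl).toNat 0)
        (k : Int) 0
      = if k < fl.length then PySem.List.pyGetD fl (k : Int) 0 else 0
    rw [PySem.List.pyGetD_natCast, pv_pad_getD fl MN k]
    by_cases hkf : k < fl.length
    · rw [if_pos hkf, PySem.List.pyGetD_natCast]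
    · rw [if_neg hkf, List.getD_eq_getElem?_getD,
        List.getElem?_eq_none (Nat.le_of_not_lt hkf)]
      rfl

-- ===== VERDICT (by name: the statement is the Claim_ definition above) =====
theorem applyC_spec : Claim_equal_applyC := by
  intro board hD _
  unfold Spec_applyC
  apply pv_main
  intro row hrow x hx
  unfold Dom_applyC at hD
  rw [List.all_eq_true] at hD
  have := hD row hrow
  rw [List.all_eq_true] at this
  have := this x hx
  unfold pvDomInt at this
  exact of_decide_eq_true this
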